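-- pv_equiv track=rewrite | github.com/aadityapanchal7/maxapp | backend/api/chat.py | _assistant_last_turn_is_fitmax_onboarding
-- ===== SOURCE A (Python) =====
-- def _assistant_last_turn_is_fitmax_onboarding(history: list) -> bool:
--     """True if the latest assistant message looks like scripted FitMax intake (app thread)."""
--     for h in reversed(history or []):
--         if h.get("role") != "assistant":
--             continue
--         c = (h.get("content") or "").lower()
--         needles = (
--             "welcome to fitmax",
--             "what's your main goal right now",
--             "training experience level",
--             "height (cm or ft/in)",
--             "current body weight",
--             "how old are you",
--             "biological sex",
--             "what do you have available to train",
--             "how many days per week can you realistically train",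
--             "session length can you commit",
--             "outside the gym, what's your daily activity",
--             "dietary restrictions",
--         )
--         return any(n in c for n in needles)
--     return False
-- ===== SOURCE B (Python) =====
-- _NEEDLES = (
--     "welcome to fitmax",
--     "what's your main goal right now",
--     "training experience level",
--     "height (cm or ft/in)",
--     "current body weight",
--     "how old are you",
--     "biological sex",
--     "what do you have available to train",
--     "how many days per week can you realistically train",
--     "session length can you commit",
--     "outside the gym, what's your daily activity",
--     "dietary restrictions",
-- )
--
--
-- def _assistant_last_turn_is_fitmax_onboarding(history: list) -> bool:
--     """True if the latest assistant message looks like scripted FitMax intake (app thread)."""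
--     verdict = False
--     for h in (history or []):
--         if h.get("role") == "assistant":
--             c = (h.get("content") or "").lower()
--             verdict = any(n in c for n in _NEEDLES)
--     return verdict
-- ===== Notes on version B (the rewrite author's own statement) =====
-- stated objective: alternative
-- what changed: Replaces A's reversed early-return scan with a single forward pass that overwrites a boolean verdict at every assistant turn, so the value left after the loop is the last assistant's verdict.
import Mathlib
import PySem

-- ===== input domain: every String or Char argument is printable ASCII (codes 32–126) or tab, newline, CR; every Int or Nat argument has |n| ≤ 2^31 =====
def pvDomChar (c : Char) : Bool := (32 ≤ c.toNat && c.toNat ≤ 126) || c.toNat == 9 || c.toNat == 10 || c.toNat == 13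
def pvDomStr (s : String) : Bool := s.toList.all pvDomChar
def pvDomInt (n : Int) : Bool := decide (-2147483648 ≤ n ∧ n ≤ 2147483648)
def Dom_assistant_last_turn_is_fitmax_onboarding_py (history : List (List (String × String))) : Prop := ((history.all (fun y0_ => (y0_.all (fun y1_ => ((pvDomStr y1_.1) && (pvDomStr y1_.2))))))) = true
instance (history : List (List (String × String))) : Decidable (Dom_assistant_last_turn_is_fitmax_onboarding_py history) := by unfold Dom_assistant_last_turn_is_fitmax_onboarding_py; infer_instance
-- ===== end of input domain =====

-- B replaces A's reversed early-return scan with a single forward pass overwriting a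
-- boolean verdict at every assistant turn (objective: alternative decomposition).


-- ===== PORT A =====
-- dict.get: first match in the association list
def pvAGet (d : List (String × String)) (k : String) : Option String :=
  (d.find? (fun p => p.1 == k)).map (·.2)

def pvANeedles : List String :=
  [ "welcome to fitmax",
    "what's your main goal right now",
    "training experience level",
    "height (cm or ft/in)",
    "current body weight",
    "how old are you",
    "biological sex",
    "what do you have available to train",
    "how many days per week can you realistically train",
    "session length can you commit",
    "outside the gym, what's your daily activity",
    "dietary restrictions" ]

-- c = (h.get("content") or "").lower(); return any(n in c for n in needles)
def pvACheck (h : List (String × String)) : Bool :=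
  let c := PySem.Str.lower ((pvAGet h "content").getD "")
  pvANeedles.any (fun n => PySem.Str.isIn n c)

-- for h in reversed(history): if role != assistant: continue; return any(...)
def pvScanA : List (List (String × String)) → Bool
  | [] => false
  | h :: rest =>
    if pvAGet h "role" ≠ some "assistant" then pvScanA rest
    else pvACheck h

def assistant_last_turn_is_fitmax_onboarding_py (history : List (List (String × String))) : Bool :=
  pvScanA history.reverse

-- ===== PORT B =====
-- first-match lookup, written as structural recursion over the assoc list
def pvBGet : List (String × String) → String → Option String
  | [], _ => none
  | p :: rest, key => if p.1 == key then some p.2 else pvBGet rest key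

def pvBNeedles : List String :=
  [ "welcome to fitmax",
    "what's your main goal right now",
    "training experience level",
    "height (cm or ft/in)",
    "current body weight",
    "how old are you",
    "biological sex",
    "what do you have available to train",
    "how many days per week can you realistically train",
    "session length can you commit",
    "outside the gym, what's your daily activity",
    "dietary restrictions" ]

-- verdict = any(n in c for n in _NEEDLES) on one assistant message
def pvBVerdict (h : List (String × String)) : Bool :=
  pvBNeedles.any (fun n =>
    PySem.Str.isIn n (PySem.Str.lower ((pvBGet h "content").getD "")))

-- forward loop: overwrite verdict at every assistant turn, return what is left
def assistant_last_turn_is_fitmax_onboarding_py_alt (history : List (List (String × String))) : Bool :=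
  history.foldl
    (fun verdict h =>
      if pvBGet h "role" == some "assistant" then pvBVerdict h else verdict)
    false

-- ===== PRECONDITION & SPEC =====
def Spec_assistant_last_turn_is_fitmax_onboarding_py (history : List (List (String × String))) (out : Bool) : Prop := out = assistant_last_turn_is_fitmax_onboarding_py_alt history
instance (history : List (List (String × String))) (out : Bool) : Decidable (Spec_assistant_last_turn_is_fitmax_onboarding_py history out) := by unfold Spec_assistant_last_turn_is_fitmax_onboarding_py; infer_instance

-- ===== CLAIM (what is proved, stated in full; the proofs are below) =====
def Claim_equal_assistant_last_turn_is_fitmax_onboarding_py : Prop := ∀ (history : List (List (String × String))), Dom_assistant_last_turn_is_fitmax_onboarding_py history → Spec_assistant_last_turn_is_fitmax_onboarding_py history (assistant_last_turn_is_fitmax_onboarding_py history)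

-- ===== LEMMAS AND PROOFS =====

-- the two lookup helpers agree
theorem pvBGet_eq_pvAGet (d : List (String × String)) (k : String) :
    pvBGet d k = pvAGet d k := by
  induction d with
  | nil => rfl
  | cons p rest ih =>
    by_cases h : p.1 = k
    · simp [pvBGet, pvAGet, List.find?_cons, h]
    · have : (p.1 == k) = false := by simp [h]
      rw [pvBGet, this]
      simp only [Bool.false_eq_true, if_false]
      rw [ih]
      unfold pvAGet
      rw [List.find?_cons, this]

-- the per-message verdicts agree
theorem pvBVerdict_eq_pvACheck (h : List (String × String)) :
    pvBVerdict h = pvACheck h := by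
  simp [pvBVerdict, pvACheck, pvBGet_eq_pvAGet, pvBNeedles, pvANeedles]

-- the forward overwrite fold equals A's reversed early-return scan
theorem foldB_eq_scanA (l : List (List (String × String))) :
    (l.foldl
      (fun verdict h =>
        if pvBGet h "role" == some "assistant" then pvBVerdict h else verdict)
      false) = pvScanA l.reverse := by
  induction l using List.reverseRecOn with
  | nil => rfl
  | append_singleton l x ih =>
    rw [List.foldl_append, List.reverse_append]
    simp only [List.foldl_cons, List.foldl_nil, List.reverse_singleton,
      List.singleton_append]
    by_cases hr : pvAGet x "role" = some "assistant"
    · have hx : (pvBGet x "role" == some "assistant") = true := by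
        simp [pvBGet_eq_pvAGet, hr]
      simp [pvScanA, hr, hx, pvBVerdict_eq_pvACheck]
    · have hx : (pvBGet x "role" == some "assistant") = false := by
        simp [pvBGet_eq_pvAGet, hr]
      simpa [pvScanA, hr, hx] using ih

-- ===== VERDICT (by name: the statement is the Claim_ definition above) =====
theorem assistant_last_turn_is_fitmax_onboarding_py_spec : Claim_equal_assistant_last_turn_is_fitmax_onboarding_py := by
  intro history _
  show assistant_last_turn_is_fitmax_onboarding_py history = _
  unfold assistant_last_turn_is_fitmax_onboarding_py assistant_last_turn_is_fitmax_onboarding_py_alt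
  rw [foldB_eq_scanA]
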